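-- pv_equiv track=rewrite | github.com/bclark27/SylSpeak | rune_gen.py | chunk_cv
-- ===== SOURCE A (Python) =====
-- def chunk_cv(word, allowed_chars=None):
--     # n = 2
--     # return [word[i:i + n] for i in range(0, len(word), n)]
--     """
--     Break word into contiguous consonant-vowel chunks.
--     Leading vowels are lumped with the first consonant cluster.
--     Skips characters not in allowed_chars.
--     """
--     if allowed_chars is None:
--         allowed_chars = set("abcdefghijklmnopqrstuvwxyz")
--
--     vowels = set("aeiouy")
--     chunks = []
--     i = 0
--     n = len(word)
--
--     current_chunk = ""
--     first_chunk = True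
--
--     while i < n:
--         c = word[i].lower()
--         i += 1
--
--         if c not in allowed_chars:
--             # skip unallowed characters without breaking the chunk
--             continue
--
--         if not current_chunk:
--             # Start a new chunk
--             current_chunk += c
--         else:
--             # Determine last char type
--             last_char = current_chunk[-1].lower()
--             last_is_vowel = last_char in vowels
--             current_is_vowel = c in vowels
--
--             if last_is_vowel and not current_is_vowel:
--                 # Start a new chunk when switching from vowel->consonant
--                 chunks.append(current_chunk)
--                 current_chunk = c
--             else:
--                 current_chunk += c
--
--     # Append the last chunk
--     if current_chunk:
--         chunks.append(current_chunk)
--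
--     # Special handling for leading vowels at the start
--     if first_chunk and chunks:
--         if chunks[0][0].lower() in vowels and len(chunks) > 1:
--             # merge leading vowels with next consonant cluster
--             chunks[0] += chunks.pop(1)
--
--     return chunks
-- ===== SOURCE B (Python) =====
-- def chunk_cv(word, allowed_chars=None):
--     """
--     Break word into contiguous consonant-vowel chunks.
--     Leading vowels are lumped with the first consonant cluster.
--     Skips characters not in allowed_chars.
--     """
--     if allowed_chars is None:
--         allowed_chars = set("abcdefghijklmnopqrstuvwxyz")
--     vowels = set("aeiouy")
--
--     # 1. keep only the allowed characters, lowercased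
--     filtered = [c.lower() for c in word if c.lower() in allowed_chars]
--
--     # 2. split into maximal runs of same vowel-ness (group-by)
--     runs = []
--     j = 0
--     while j < len(filtered):
--         k = j + 1
--         while k < len(filtered) and (filtered[k] in vowels) == (filtered[j] in vowels):
--             k += 1
--         runs.append("".join(filtered[j:k]))
--         j = k
--
--     # 3. each consonant run joins the vowel run right after it
--     chunks = []
--     i = 0
--     while i < len(runs):
--         if runs[i][0] not in vowels and i + 1 < len(runs):
--             chunks.append(runs[i] + runs[i + 1])
--             i += 2
--         else:
--             chunks.append(runs[i])
--             i += 1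
--
--     # 4. a leading vowel chunk is merged into the following chunk
--     if chunks and chunks[0][0] in vowels and len(chunks) > 1:
--         chunks[0] += chunks.pop(1)
--
--     return chunks
-- ===== Notes on version B (the rewrite author's own statement) =====
-- stated objective: alternative
-- what changed: Replaces A's single stateful while-loop (growing a current chunk character by character and breaking on each vowel-to-consonant switch) with a three-phase pipeline: filter+lowercase, group into maximal vowel/consonant runs, then pair each consonant run with the vowel run that follows it.
import Mathlib
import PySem

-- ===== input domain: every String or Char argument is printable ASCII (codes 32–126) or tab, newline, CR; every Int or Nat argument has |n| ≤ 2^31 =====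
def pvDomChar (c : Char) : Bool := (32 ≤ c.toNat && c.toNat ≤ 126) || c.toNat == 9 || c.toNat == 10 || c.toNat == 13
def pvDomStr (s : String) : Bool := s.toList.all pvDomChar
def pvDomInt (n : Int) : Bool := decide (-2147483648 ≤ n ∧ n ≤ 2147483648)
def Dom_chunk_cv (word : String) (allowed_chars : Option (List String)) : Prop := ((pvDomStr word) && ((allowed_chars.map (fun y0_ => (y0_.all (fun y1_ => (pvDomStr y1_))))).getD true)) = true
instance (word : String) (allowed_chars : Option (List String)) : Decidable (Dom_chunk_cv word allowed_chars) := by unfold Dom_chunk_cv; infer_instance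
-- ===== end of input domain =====

-- B replaces A's single stateful character loop by a filter → group-into-runs → pair-runs
-- pipeline (objective: alternative; same O(n) cost, no speed claim).

-- ===== PORT A =====
-- set("aeiouy") / set("abcdefghijklmnopqrstuvwxyz") are sets of ONE-character strings; membership
-- of the one-char string c is exactly membership of the char (String equality on 1-char strings).
def pvVowels : List Char := PySem.Set.ofList "aeiouy".toList

def pvIsVowel (c : Char) : Bool := pvVowels.contains c

-- `c in allowed_chars`: c is a one-char string; against the default it is char membership,
-- against a user list it is Python string equality with some element (exact).
def pvAllowed (allowed_chars : Option (List String)) (c : Char) : Bool :=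
  match allowed_chars with
  | none => (PySem.Set.ofList "abcdefghijklmnopqrstuvwxyz".toList).contains c
  | some l => l.contains (String.ofList [c])

-- the while-loop of A; the `if current_chunk: chunks.append(current_chunk)` after the loop is the [] case
def chunkA_loop (allowed_chars : Option (List String)) :
    List Char → List Char → List (List Char) → List (List Char)
  | [], current, chunks => if current.isEmpty then chunks else chunks ++ [current]
  | ch :: rest, current, chunks =>
    let c := PySem.Chars.lowerChar ch
    if !(pvAllowed allowed_chars c) then
      chunkA_loop allowed_chars rest current chunks
    else if current.isEmpty then
      chunkA_loop allowed_chars rest (current ++ [c]) chunks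
    else
      let last_char := PySem.Chars.lowerChar (current.getLastD ' ')  -- current is nonempty here; default unreachable
      if pvIsVowel last_char && !(pvIsVowel c) then
        chunkA_loop allowed_chars rest [c] (chunks ++ [current])
      else
        chunkA_loop allowed_chars rest (current ++ [c]) chunks

def chunk_cv (word : String) (allowed_chars : Option (List String)) : List String :=
  let chunks := chunkA_loop allowed_chars word.toList [] []
  -- `first_chunk` is never set to False in A, so the guard is just chunks ≠ [] ∧ len(chunks) > 1
  let chunks :=
    match chunks with
    | c0 :: c1 :: rest =>
      if pvIsVowel (PySem.Chars.lowerChar (c0.headD ' ')) then (c0 ++ c1) :: rest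
      else c0 :: c1 :: rest
    | _ => chunks
  chunks.map String.ofList

-- ===== PORT B =====
-- B's own copies of the vowel / allowed membership tests (same reading as A's)
def pvVowelsB : List Char := PySem.Set.ofList "aeiouy".toList

def pvIsVowelB (c : Char) : Bool := pvVowelsB.contains c

def pvAllowedB (allowed_chars : Option (List String)) (c : Char) : Bool :=
  match allowed_chars with
  | none => (PySem.Set.ofList "abcdefghijklmnopqrstuvwxyz".toList).contains c
  | some l => l.contains (String.ofList [c])

-- step 1: [c.lower() for c in word if c.lower() in allowed_chars]
def chunkB_filter (allowed_chars : Option (List String)) (cs : List Char) : List Char :=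
  cs.filterMap (fun ch =>
    let c := PySem.Chars.lowerChar ch
    if pvAllowedB allowed_chars c then some c else none)

-- step 2: maximal runs of equal vowel-ness (the j/k while loops; filtered[j:k] is c :: takeWhile)
def chunkB_runs (filtered : List Char) : List (List Char) :=
  match filtered with
  | [] => []
  | c :: rest =>
    let r := rest.takeWhile (fun x => pvIsVowelB x == pvIsVowelB c)
    (c :: r) :: chunkB_runs (rest.drop r.length)
termination_by filtered.length
decreasing_by simp

-- step 3: each consonant run joins the vowel run right after it
def chunkB_pair : List (List Char) → List (List Char)
  | [] => []
  | r :: rs =>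
    if !(pvIsVowelB (r.headD ' ')) then
      match rs with
      | r2 :: rs' => (r ++ r2) :: chunkB_pair rs'
      | [] => [r]
    else r :: chunkB_pair rs

def chunk_cv_alt (word : String) (allowed_chars : Option (List String)) : List String :=
  let filtered := chunkB_filter allowed_chars word.toList
  let chunks := chunkB_pair (chunkB_runs filtered)
  -- step 4: a leading vowel chunk is merged into the following chunk
  let chunks :=
    match chunks with
    | [] => []
    | c0 :: rest =>
      match rest with
      | [] => [c0]
      | c1 :: rest' =>
        if pvIsVowelB (c0.headD ' ') then (c0 ++ c1) :: rest' else c0 :: c1 :: rest'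
  chunks.map String.ofList

-- ===== PRECONDITION & SPEC =====
def Spec_chunk_cv (word : String) (allowed_chars : Option (List String)) (out : List String) : Prop := out = chunk_cv_alt word allowed_chars
instance (word : String) (allowed_chars : Option (List String)) (out : List String) : Decidable (Spec_chunk_cv word allowed_chars out) := by unfold Spec_chunk_cv; infer_instance

-- ===== CLAIM (what is proved, stated in full; the proofs are below) =====
def Claim_equal_chunk_cv : Prop := ∀ (word : String) (allowed_chars : Option (List String)), Dom_chunk_cv word allowed_chars → Spec_chunk_cv word allowed_chars (chunk_cv word allowed_chars)

-- ===== LEMMAS AND PROOFS =====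

theorem pvIsVowelB_eq : pvIsVowelB = pvIsVowel := rfl
theorem pvAllowedB_eq : pvAllowedB = pvAllowed := rfl

-- Char.toLower is idempotent
theorem pvLower_idem (c : Char) :
    PySem.Chars.lowerChar (PySem.Chars.lowerChar c) = PySem.Chars.lowerChar c := by
  by_cases h : PySem.Chars.isupper c = true
  · have hb : 65 ≤ c.toNat ∧ c.toNat ≤ 90 := by
      simp only [PySem.Chars.isupper, Bool.and_eq_true, decide_eq_true_eq] at h
      exact ⟨h.1, h.2⟩
    have hval : (c.toNat + 32).isValidChar := by left; omega
    have hv : (Char.ofNat (c.toNat + 32)).toNat = c.toNat + 32 := by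
      unfold Char.ofNat; rw [dif_pos hval]; exact Char.toNat_ofNatAux hval
    have h2 : PySem.Chars.isupper (Char.ofNat (c.toNat + 32)) = false := by
      simp only [PySem.Chars.isupper, Bool.and_eq_false_iff, decide_eq_false_iff_not, not_le]
      right
      have hlt : 'Z'.toNat < (Char.ofNat (c.toNat + 32)).toNat := by
        have hz : 'Z'.toNat = 90 := rfl
        rw [hv, hz]; omega
      exact Char.lt_def.mpr hlt
    simp [PySem.Chars.lowerChar, h, h2]
  · simp [PySem.Chars.lowerChar, h]

-- A's loop with the skip/lower steps stripped away: it processes the filtered, lowered characters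
def coreA : List Char → List Char → List (List Char)
  | [], cur => if cur.isEmpty then [] else [cur]
  | c :: fs, cur =>
    if cur.isEmpty then coreA fs [c]
    else if pvIsVowel (cur.getLastD ' ') && !(pvIsVowel c) then cur :: coreA fs [c]
    else coreA fs (cur ++ [c])

-- runs, computed front-to-back by cons (same value as chunkB_runs' span form)
def runsC : List Char → List (List Char)
  | [] => []
  | c :: fs =>
    match runsC fs with
    | [] => [[c]]
    | r :: rs => if pvIsVowel c == pvIsVowel (r.headD ' ') then (c :: r) :: rs else [c] :: r :: rs

-- what coreA produces from state `cur` when the remaining input has runs `rs`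
def outO (cur : List Char) (rs : List (List Char)) : List (List Char) :=
  if cur.isEmpty then chunkB_pair rs
  else
    match rs with
    | [] => [cur]
    | r :: rs' =>
      if pvIsVowel (r.headD ' ') then (cur ++ r) :: chunkB_pair rs'
      else if pvIsVowel (cur.getLastD ' ') then cur :: chunkB_pair (r :: rs')
      else
        match rs' with
        | [] => [cur ++ r]
        | r2 :: rs'' => (cur ++ r ++ r2) :: chunkB_pair rs''

theorem pv_loop_eq_core (allowed_chars : Option (List String)) (cs : List Char) :
    ∀ cur chunks, (∀ x ∈ cur, PySem.Chars.lowerChar x = x) →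
      chunkA_loop allowed_chars cs cur chunks =
        chunks ++ coreA (chunkB_filter allowed_chars cs) cur := by
  induction cs with
  | nil =>
    intro cur chunks _
    by_cases h : cur.isEmpty <;> simp [chunkA_loop, chunkB_filter, coreA, h]
  | cons ch rest ih =>
    intro cur chunks hcur
    by_cases ha : pvAllowedB allowed_chars (PySem.Chars.lowerChar ch) = true
    · have hf : chunkB_filter allowed_chars (ch :: rest) =
          PySem.Chars.lowerChar ch :: chunkB_filter allowed_chars rest := by
        simp [chunkB_filter, ha]
      by_cases he : cur.isEmpty
      · have hc : cur = [] := by simpa [List.isEmpty_iff] using he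
        subst hc
        rw [hf]
        simp only [chunkA_loop, pvAllowedB_eq ▸ ha, Bool.not_true, Bool.false_eq_true, if_false, List.isEmpty_nil,
          if_true, List.nil_append]
        rw [ih [PySem.Chars.lowerChar ch] chunks (by simpa using pvLower_idem ch)]
        simp [coreA]
      · have hlast : PySem.Chars.lowerChar (cur.getLastD ' ') = cur.getLastD ' ' := by
          apply hcur
          have hne : cur ≠ [] := by simpa [List.isEmpty_iff] using he
          match cur, hne with
          | y :: t, _ => rw [List.getLastD_cons]; exact List.getLastD_mem_cons
        rw [hf]
        simp only [chunkA_loop, pvAllowedB_eq ▸ ha, Bool.not_true, Bool.false_eq_true, if_false, he, hlast]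
        by_cases hv : (pvIsVowel (cur.getLastD ' ') && !pvIsVowel (PySem.Chars.lowerChar ch)) = true
        · rw [if_pos hv]
          rw [ih [PySem.Chars.lowerChar ch] (chunks ++ [cur]) (by simpa using pvLower_idem ch)]
          simp only [coreA]
          rw [if_neg he, if_pos hv, List.append_assoc]
          rfl
        · rw [if_neg hv]
          rw [ih (cur ++ [PySem.Chars.lowerChar ch]) chunks ?_]
          · simp only [coreA]
            rw [if_neg he, if_neg hv]
          · intro x hx
            rcases List.mem_append.mp hx with h | h
            · exact hcur x h
            · simp at h; rw [h]; exact pvLower_idem ch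
    · have hf : chunkB_filter allowed_chars (ch :: rest) = chunkB_filter allowed_chars rest := by
        simp [chunkB_filter, ha]
      rw [hf]
      simp only [chunkA_loop]
      rw [if_pos (by simp [← pvAllowedB_eq, ha])]
      simpa using ih cur chunks hcur

theorem pv_drop_takeWhile (p : Char → Bool) (l : List Char) :
    l.drop (l.takeWhile p).length = l.dropWhile p := by
  induction l with
  | nil => rfl
  | cons a l ih => by_cases h : p a <;> simp [h, ih]

theorem pv_runsC_span (c : Char) (rest : List Char) :
    runsC (c :: rest) =
      (c :: rest.takeWhile (fun x => pvIsVowel x == pvIsVowel c)) ::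
        runsC (rest.dropWhile (fun x => pvIsVowel x == pvIsVowel c)) := by
  induction rest generalizing c with
  | nil => simp [runsC]
  | cons d rest ih =>
    by_cases h : pvIsVowel d = pvIsVowel c
    · have hd : (pvIsVowel d == pvIsVowel c) = true := by simp [h]
      show (match runsC (d :: rest) with
        | [] => [[c]]
        | r :: rs => if pvIsVowel c == pvIsVowel (r.headD ' ') then (c :: r) :: rs else [c] :: r :: rs) = _
      rw [ih d]
      simp only [List.headD_cons, List.takeWhile_cons, List.dropWhile_cons, h]
      simp
    · have hd : (pvIsVowel d == pvIsVowel c) = false := by simp [h]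
      show (match runsC (d :: rest) with
        | [] => [[c]]
        | r :: rs => if pvIsVowel c == pvIsVowel (r.headD ' ') then (c :: r) :: rs else [c] :: r :: rs) = _
      rw [ih d]
      simp only [List.headD_cons, List.takeWhile_cons, List.dropWhile_cons, hd]
      have hcd : (pvIsVowel c == pvIsVowel d) = false := by
        simp only [beq_eq_false_iff_ne, ne_eq]
        exact fun hh => h hh.symm
      rw [if_neg (by simp [hcd]), if_neg (by simp), if_neg (by simp)]
      rw [ih d]

theorem pv_runs_eq (fs : List Char) : chunkB_runs fs = runsC fs := by
  induction hn : fs.length using Nat.strong_induction_on generalizing fs with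
  | _ n ih =>
    match fs with
    | [] => simp [chunkB_runs, runsC]
    | c :: rest =>
      rw [chunkB_runs]
      simp only [pvIsVowelB_eq]
      rw [pv_runsC_span]
      congr 1
      rw [pv_drop_takeWhile]
      apply ih ((rest.dropWhile (fun x => pvIsVowel x == pvIsVowel c)).length) ?_ _ rfl
      subst hn
      have h1 := List.length_dropWhile_le (p := fun x => pvIsVowel x == pvIsVowel c) (l := rest)
      simp only [List.length_cons]
      omega

theorem pv_getLastD_cons_concat (y c : Char) (t : List Char) :
    ((y :: (t ++ [c])).getLast?.getD ' ') = c := by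
  have : y :: (t ++ [c]) = (y :: t) ++ [c] := by simp
  rw [this, List.getLast?_concat]
  rfl

theorem pv_runsC_nonnil (fs : List Char) : ∀ r ∈ runsC fs, r ≠ [] := by
  induction fs with
  | nil => simp [runsC]
  | cons c fs ih =>
    intro r hr
    have hrc : runsC (c :: fs) =
        match runsC fs with
        | [] => [[c]]
        | q :: qs => if pvIsVowel c == pvIsVowel (q.headD ' ') then (c :: q) :: qs
                     else [c] :: q :: qs := rfl
    rw [hrc] at hr
    rcases h : runsC fs with _ | ⟨q, qs⟩ <;> rw [h] at hr <;> dsimp only at hr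
    · simp at hr; subst hr; simp
    · split_ifs at hr
      · rcases List.mem_cons.mp hr with h1 | h1
        · subst h1; simp
        · exact ih r (by rw [h]; simp [h1])
      · rcases List.mem_cons.mp hr with h1 | h1
        · subst h1; simp
        · exact ih r (by rw [h]; exact h1)

theorem pv_core_eq_out (fs : List Char) :
    ∀ cur, coreA fs cur = outO cur (runsC fs) := by
  induction fs with
  | nil =>
    intro cur
    rcases cur with _ | ⟨y, t⟩ <;> simp [coreA, outO, runsC, chunkB_pair, pvIsVowelB_eq]
  | cons c fs ih =>
    intro cur
    have hstep : coreA (c :: fs) cur =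
        if cur.isEmpty then coreA fs [c]
        else if pvIsVowel (cur.getLastD ' ') && !pvIsVowel c then cur :: coreA fs [c]
        else coreA fs (cur ++ [c]) := rfl
    have hrc : runsC (c :: fs) =
        match runsC fs with
        | [] => [[c]]
        | r :: rs => if pvIsVowel c == pvIsVowel (r.headD ' ') then (c :: r) :: rs
                     else [c] :: r :: rs := rfl
    rw [hstep, ih, ih, hrc]
    rcases hr : runsC fs with _ | ⟨r, rs⟩
    · rcases cur with _ | ⟨y, t⟩
      · by_cases hc : pvIsVowel c = true <;> simp [outO, chunkB_pair, pvIsVowelB_eq, hc]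
      · by_cases hc : pvIsVowel c = true <;>
          by_cases hl : pvIsVowel ((y :: t).getLastD ' ') = true <;>
            simp [outO, chunkB_pair, pvIsVowelB_eq, hc, hl, List.getLastD_concat, pv_getLastD_cons_concat]
    · rcases r with _ | ⟨a, r⟩
      · exact absurd rfl (pv_runsC_nonnil fs [] (by rw [hr]; simp))
      · rcases cur with _ | ⟨y, t⟩ <;> rcases rs with _ | ⟨r2, rs'⟩ <;>
          by_cases hc : pvIsVowel c = true <;>
          by_cases hh : pvIsVowel a = true <;>
          first
          | (simp [outO, chunkB_pair, pvIsVowelB_eq, hc, hh, List.getLastD_concat, pv_getLastD_cons_concat])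
          | (by_cases hl : pvIsVowel ((y :: t).getLastD ' ') = true <;>
               simp [outO, chunkB_pair, pvIsVowelB_eq, hc, hh, hl, List.getLastD_concat, pv_getLastD_cons_concat])

theorem pv_core_chars (fs : List Char) :
    ∀ cur, (∀ x ∈ fs, PySem.Chars.lowerChar x = x) →
      (∀ x ∈ cur, PySem.Chars.lowerChar x = x) →
      ∀ ch ∈ coreA fs cur, ∀ x ∈ ch, PySem.Chars.lowerChar x = x := by
  induction fs with
  | nil =>
    intro cur _ hcur ch hch
    simp only [coreA] at hch
    split_ifs at hch
    · simp at hch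
    · simp only [List.mem_singleton] at hch
      subst hch; exact hcur
  | cons c fs ih =>
    intro cur hfs hcur ch hch
    have hc : PySem.Chars.lowerChar c = c := hfs c (by simp)
    have hfs' : ∀ x ∈ fs, PySem.Chars.lowerChar x = x := fun x hx => hfs x (by simp [hx])
    simp only [coreA] at hch
    split_ifs at hch with h1 h2
    · exact ih [c] hfs' (by simpa using hc) ch hch
    · rcases List.mem_cons.mp hch with h | h
      · subst h; exact hcur
      · exact ih [c] hfs' (by simpa using hc) ch h
    · refine ih (cur ++ [c]) hfs' ?_ ch hch
      intro x hx
      rcases List.mem_append.mp hx with h | h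
      · exact hcur x h
      · simp at h; subst h; exact hc

theorem pv_filter_chars (allowed_chars : Option (List String)) (cs : List Char) :
    ∀ x ∈ chunkB_filter allowed_chars cs, PySem.Chars.lowerChar x = x := by
  intro x hx
  simp only [chunkB_filter, List.mem_filterMap] at hx
  obtain ⟨ch, _, hx⟩ := hx
  by_cases h : pvAllowedB allowed_chars (PySem.Chars.lowerChar ch) = true <;>
    simp [h] at hx
  rw [← hx]; exact pvLower_idem ch

-- ===== VERDICT (by name: the statement is the Claim_ definition above) =====
theorem chunk_cv_spec : Claim_equal_chunk_cv := by
  intro word allowed_chars _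
  show chunk_cv word allowed_chars = chunk_cv_alt word allowed_chars
  have h1 : chunkA_loop allowed_chars word.toList [] [] =
      chunkB_pair (chunkB_runs (chunkB_filter allowed_chars word.toList)) := by
    rw [pv_loop_eq_core allowed_chars word.toList [] [] (by simp), pv_core_eq_out, pv_runs_eq]
    simp [outO]
  have hch : ∀ ch ∈ chunkA_loop allowed_chars word.toList [] [],
      ∀ x ∈ ch, PySem.Chars.lowerChar x = x := by
    rw [pv_loop_eq_core allowed_chars word.toList [] [] (by simp)]
    simpa using pv_core_chars _ [] (pv_filter_chars allowed_chars word.toList) (by simp)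
  unfold chunk_cv chunk_cv_alt
  dsimp only
  rw [← h1]
  match hc : chunkA_loop allowed_chars word.toList [] [] with
  | [] => simp
  | [c0] => simp
  | c0 :: c1 :: rest =>
    have hc0 : PySem.Chars.lowerChar (c0.headD ' ') = c0.headD ' ' := by
      match c0 with
      | [] => decide
      | y :: t => exact hch (y :: t) (by rw [hc]; simp) y (by simp)
    simp only [hc0, pvIsVowelB_eq]
    rfl
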